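-- pv_equiv track=rewrite | github.com/carlosfranzreb/aoc22 | day8.py | scores_one_side
-- ===== SOURCE A (Python) =====
-- def scores_one_side(ints, reverse):
--     """Given a list of integers, return an array of the same size stating the score
--     of each value. The score equals the number of trees to the left that are smaller
--     than the current value, stopping at the first one that is larger or of equal
--     size."""
--     if reverse:
--         ints = ints[::-1]
--     scores = [0 for _ in ints]
--     for i, height in enumerate(ints):
--         for j in range(i - 1, -1, -1):
--             if ints[j] < height:
--                 scores[i] += 1
--             else:
--                 scores[i] += 1
--                 break
--     if reverse:
--         scores = scores[::-1]
--     return scores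
-- ===== SOURCE B (Python) =====
-- def scores_one_side(ints, reverse):
--     if reverse:
--         ints = ints[::-1]
--     scores = []
--     stack = []  # (index, height) pairs; heights strictly decreasing bottom-to-top
--     for i, h in enumerate(ints):
--         while stack and stack[-1][1] < h:
--             stack.pop()
--         scores.append(i - stack[-1][0] if stack else i)
--         stack.append((i, h))
--     if reverse:
--         scores.reverse()
--     return scores
-- ===== Notes on version B (the rewrite author's own statement) =====
-- stated objective: faster
-- what changed: Replaces A's per-element backward scan (counting trees until the first one >= current) by a single left-to-right pass with a monotonic decreasing stack of (index, height) pairs, computing each score as the distance to the nearest left element >= current.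
import Mathlib
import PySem

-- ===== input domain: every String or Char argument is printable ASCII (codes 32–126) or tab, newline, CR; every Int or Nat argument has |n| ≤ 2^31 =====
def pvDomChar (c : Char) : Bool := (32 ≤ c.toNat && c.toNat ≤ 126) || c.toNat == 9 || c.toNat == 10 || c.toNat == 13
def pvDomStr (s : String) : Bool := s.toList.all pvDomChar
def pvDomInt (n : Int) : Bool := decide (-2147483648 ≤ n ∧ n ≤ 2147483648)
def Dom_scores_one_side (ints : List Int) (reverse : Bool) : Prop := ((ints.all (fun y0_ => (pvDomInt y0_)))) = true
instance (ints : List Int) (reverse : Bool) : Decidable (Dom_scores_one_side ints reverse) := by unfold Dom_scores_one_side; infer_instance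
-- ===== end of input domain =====

-- B replaces A's quadratic per-element backward scan by a single left-to-right pass with a
-- monotonic stack of (index, height) pairs (nearest left element ≥ current); objective: faster.

-- ===== PORT A =====
-- inner loop 'for j in range(i-1,-1,-1): if ints[j] < height: scores[i] += 1 else: scores[i] += 1; break'
-- accumulated as a countdown recursion over j (j is always a valid index when read, so getD is exact)
def pvInnerA (ints : List Int) (height : Int) (j : Int) : Int :=
  if _h : j < 0 then 0
  else if (PySem.List.pyGet? ints j).getD 0 < height then 1 + pvInnerA ints height (j - 1)
  else 1
termination_by (j + 1).toNat
decreasing_by omega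

def scores_one_side (ints : List Int) (reverse : Bool) : List Int :=
  let ints1 := if reverse then (PySem.List.slice? ints none none (-1)).getD [] else ints
  -- scores = [0 ...]; each scores[i] is built up by the inner loop, totalled by pvInnerA
  let scores := (PySem.List.enumerate ints1 0).map (fun p => pvInnerA ints1 p.2 (p.1 - 1))
  if reverse then (PySem.List.slice? scores none none (-1)).getD [] else scores

-- ===== PORT B =====
def scores_one_side_alt (ints : List Int) (reverse : Bool) : List Int :=
  let ints1 := if reverse then (PySem.List.slice? ints none none (-1)).getD [] else ints
  -- stack top = list head; 'while stack and stack[-1][1] < h: stack.pop()' = dropWhile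
  let res := (PySem.List.enumerate ints1 0).foldl
      (fun (st : List (Int × Int) × List Int) p =>
        let stack := st.1.dropWhile (fun q => q.2 < p.2)
        let s := match stack with | [] => p.1 | (j, _) :: _ => p.1 - j
        ((p.1, p.2) :: stack, st.2 ++ [s]))
      ([], [])
  if reverse then res.2.reverse else res.2

-- ===== PRECONDITION & SPEC =====
def Spec_scores_one_side (ints : List Int) (reverse : Bool) (out : List Int) : Prop := out = scores_one_side_alt ints reverse
instance (ints : List Int) (reverse : Bool) (out : List Int) : Decidable (Spec_scores_one_side ints reverse out) := by unfold Spec_scores_one_side; infer_instance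

-- ===== CLAIM (what is proved, stated in full; the proofs are below) =====
def Claim_equal_scores_one_side : Prop := ∀ (ints : List Int) (reverse : Bool), Dom_scores_one_side ints reverse → Spec_scores_one_side ints reverse (scores_one_side ints reverse)

-- ===== LEMMAS AND PROOFS =====

-- the stack after processing the first k elements of hs
def pvStack (hs : List Int) : Nat → List (Int × Int)
  | 0 => []
  | k + 1 => ((k : Int), hs.getD k 0) :: (pvStack hs k).dropWhile (fun q => q.2 < hs.getD k 0)

theorem pv_dropWhile_dropWhile {α : Type} (p q : α → Bool) (l : List α)
    (h : ∀ x, q x = true → p x = true) :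
    (l.dropWhile q).dropWhile p = l.dropWhile p := by
  induction l with
  | nil => rfl
  | cons x xs ih =>
    by_cases hq : q x = true
    · rw [List.dropWhile_cons_of_pos hq, ih, List.dropWhile_cons_of_pos (h x hq)]
    · rw [List.dropWhile_cons_of_neg hq]

-- A's inner count = viewing distance read off the stack
theorem pvInnerA_eq_stack (hs : List Int) (k : Nat) (h : Int) :
    pvInnerA hs h ((k : Int) - 1) =
      (match (pvStack hs k).dropWhile (fun q => q.2 < h) with
       | [] => (k : Int)
       | (j, _) :: _ => (k : Int) - j) := by
  induction k generalizing h with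
  | zero => simp [pvInnerA, pvStack]
  | succ k ih =>
    have hk1 : ((k + 1 : Nat) : Int) - 1 = (k : Int) := by push_cast; ring
    rw [hk1]
    rw [pvInnerA]
    have hnn : ¬ ((k : Int) < 0) := by omega
    rw [dif_neg hnn]
    have hget : (PySem.List.pyGet? hs (k : Int)).getD 0 = hs.getD k 0 := by
      simp [PySem.List.pyGet?_natCast, List.getD]
    rw [hget]
    by_cases hlt : hs.getD k 0 < h
    · rw [if_pos hlt, ih h]
      show _ = (match ((pvStack hs (k+1)).dropWhile (fun q => q.2 < h)) with
        | [] => ((k + 1 : Nat) : Int) | (j, _) :: _ => ((k + 1 : Nat) : Int) - j)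
      rw [pvStack]
      rw [List.dropWhile_cons_of_pos (by simp only [decide_eq_true_eq]; exact hlt)]
      rw [pv_dropWhile_dropWhile _ _ _
        (by intro x hx; simp only [decide_eq_true_eq] at hx ⊢; omega)]
      cases hdw : (pvStack hs k).dropWhile (fun q => q.2 < h) with
      | nil => push_cast; ring
      | cons a t => cases a; push_cast; ring
    · rw [if_neg hlt]
      show _ = (match ((pvStack hs (k+1)).dropWhile (fun q => q.2 < h)) with
        | [] => ((k + 1 : Nat) : Int) | (j, _) :: _ => ((k + 1 : Nat) : Int) - j)
      rw [pvStack]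
      rw [List.dropWhile_cons_of_neg (by simp only [decide_eq_true_eq]; exact hlt)]
      push_cast; ring

-- B's fold over the suffix starting at k, from stack pvStack hs k, appends A's scores
theorem pv_fold_eq_map (hs : List Int) (l : List Int) (k : Nat) (acc : List Int)
    (hdrop : hs.drop k = l) :
    ((PySem.List.enumerate l (k : Int)).foldl
        (fun (st : List (Int × Int) × List Int) p =>
          let stack := st.1.dropWhile (fun q => q.2 < p.2)
          let s := match stack with | [] => p.1 | (j, _) :: _ => p.1 - j
          ((p.1, p.2) :: stack, st.2 ++ [s]))
        (pvStack hs k, acc)).2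
      = acc ++ (PySem.List.enumerate l (k : Int)).map (fun p => pvInnerA hs p.2 (p.1 - 1)) := by
  induction l generalizing k acc with
  | nil => simp [PySem.List.enumerate_nil]
  | cons x xs ih =>
    have hx : hs.getD k 0 = x := by
      have h0 : hs[k]? = some x := by
        have h1 : (hs.drop k)[0]? = some x := by rw [hdrop]; rfl
        simpa using h1
      simp [List.getD, h0]
    have hdrop' : hs.drop (k + 1) = xs := by
      have h2 : List.drop 1 (List.drop k hs) = List.drop (k + 1) hs := List.drop_drop
      rw [← h2, hdrop]; rfl
    rw [PySem.List.enumerate_cons, List.foldl_cons, List.map_cons]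
    have hcast : (k : Int) + 1 = ((k + 1 : Nat) : Int) := by push_cast; ring
    have hstep :
        (let stack := (pvStack hs k).dropWhile (fun q => q.2 < x)
         let s := match stack with | [] => (k : Int) | (j, _) :: _ => (k : Int) - j
         (((k : Int), x) :: stack, acc ++ [s]))
        = (pvStack hs (k + 1), acc ++ [pvInnerA hs x ((k : Int) - 1)]) := by
      rw [Prod.mk.injEq]
      refine ⟨?_, ?_⟩
      · rw [pvStack, hx]
      · rw [pvInnerA_eq_stack hs k x]
    rw [hstep, hcast, ih (k + 1) _ hdrop']
    simp

theorem pv_core (hs : List Int) :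
    ((PySem.List.enumerate hs 0).foldl
        (fun (st : List (Int × Int) × List Int) p =>
          let stack := st.1.dropWhile (fun q => q.2 < p.2)
          let s := match stack with | [] => p.1 | (j, _) :: _ => p.1 - j
          ((p.1, p.2) :: stack, st.2 ++ [s]))
        ([], [])).2
      = (PySem.List.enumerate hs 0).map (fun p => pvInnerA hs p.2 (p.1 - 1)) := by
  have := pv_fold_eq_map hs hs 0 [] (by simp)
  simpa [pvStack] using this

-- ===== VERDICT (by name: the statement is the Claim_ definition above) =====
theorem scores_one_side_spec : Claim_equal_scores_one_side := by
  intro ints reverse _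
  unfold Spec_scores_one_side scores_one_side scores_one_side_alt
  cases reverse <;> simp [pv_core, PySem.List.slice?_none_none_neg_one]
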